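-- pv_equiv track=rewrite | github.com/bsulman/REDOX-PFLOTRAN | decomp_network.py | make_nodecolors
-- ===== SOURCE A (Python) =====
-- def make_nodecolors(nodes,POMcol='C0',microbecol='C1',DOMcol='C2',MAOMcol='C3',littercol='g',CWDcol='brown'):
--     colors=[]
--     for node in nodes:
--         if 'MICROBES' in node:
--             colors.append(microbecol)
--         elif 'MAOM' in node or 'SOIL' in node:
--             colors.append(MAOMcol)
--         elif 'DOM' in node:
--             colors.append(DOMcol)
--         elif 'LITR' in node:
--             colors.append(littercol)
--         elif 'CWD' in node:
--             colors.append(CWDcol)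
--         else:
--             colors.append(POMcol)
--     return colors
-- ===== SOURCE B (Python) =====
-- def make_nodecolors(nodes,POMcol='C0',microbecol='C1',DOMcol='C2',MAOMcol='C3',littercol='g',CWDcol='brown'):
--     # Staged overwrite passes: start with all POMcol, then sweep keyword passes
--     # from lowest to highest priority; later passes overwrite earlier ones, so
--     # each position ends with the color of its highest-priority matching keyword.
--     colors = [POMcol] * len(nodes)
--     for kw, col in [('CWD', CWDcol), ('LITR', littercol), ('DOM', DOMcol),
--                     ('SOIL', MAOMcol), ('MAOM', MAOMcol), ('MICROBES', microbecol)]: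
--         for i, node in enumerate(nodes):
--             if kw in node:
--                 colors[i] = col
--     return colors
-- ===== Notes on version B (the rewrite author's own statement) =====
-- stated objective: alternative
-- what changed: Replaces the per-node first-match if-elif chain by staged overwrite passes: the output starts as all POMcol and six keyword sweeps in reverse priority order (CWD..MICROBES) overwrite matching positions, so last-write-wins reproduces the priority.
import Mathlib
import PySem

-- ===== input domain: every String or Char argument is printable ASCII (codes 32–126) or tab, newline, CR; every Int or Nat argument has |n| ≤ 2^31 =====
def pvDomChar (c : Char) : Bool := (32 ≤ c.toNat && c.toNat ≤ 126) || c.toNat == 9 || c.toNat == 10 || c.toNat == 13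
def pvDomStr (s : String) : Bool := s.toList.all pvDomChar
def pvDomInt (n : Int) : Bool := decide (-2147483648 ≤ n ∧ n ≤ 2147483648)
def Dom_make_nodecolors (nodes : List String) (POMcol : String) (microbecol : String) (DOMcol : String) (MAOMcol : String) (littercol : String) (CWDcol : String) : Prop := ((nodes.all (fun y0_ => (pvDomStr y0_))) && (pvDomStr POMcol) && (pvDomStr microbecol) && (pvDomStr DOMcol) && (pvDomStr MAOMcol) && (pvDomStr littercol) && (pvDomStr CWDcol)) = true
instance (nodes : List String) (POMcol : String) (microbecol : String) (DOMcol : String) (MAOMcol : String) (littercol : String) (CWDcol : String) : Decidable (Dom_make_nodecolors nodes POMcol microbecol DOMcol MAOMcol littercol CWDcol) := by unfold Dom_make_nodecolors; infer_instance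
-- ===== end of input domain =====

-- B replaces A's per-node if-elif chain by staged overwrite passes in reverse priority order (alternative decomposition; same return value).


-- ===== PORT A =====
def make_nodecolors (nodes : List String) (POMcol : String) (microbecol : String) (DOMcol : String) (MAOMcol : String) (littercol : String) (CWDcol : String) : List String :=
  nodes.foldl (fun colors node =>
    if PySem.Str.isIn "MICROBES" node then colors ++ [microbecol]
    else if PySem.Str.isIn "MAOM" node || PySem.Str.isIn "SOIL" node then colors ++ [MAOMcol]
    else if PySem.Str.isIn "DOM" node then colors ++ [DOMcol]
    else if PySem.Str.isIn "LITR" node then colors ++ [littercol]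
    else if PySem.Str.isIn "CWD" node then colors ++ [CWDcol]
    else colors ++ [POMcol]) []

-- ===== PORT B =====
-- one overwrite pass: positions whose node contains kw get col, others keep their color
def overwritePass (nodes colors : List String) (kw col : String) : List String :=
  (nodes.zip colors).map (fun p => if PySem.Str.isIn kw p.1 then col else p.2)

def make_nodecolors_alt (nodes : List String) (POMcol : String) (microbecol : String) (DOMcol : String) (MAOMcol : String) (littercol : String) (CWDcol : String) : List String :=
  ([("CWD", CWDcol), ("LITR", littercol), ("DOM", DOMcol),
    ("SOIL", MAOMcol), ("MAOM", MAOMcol), ("MICROBES", microbecol)] : List (String × String)).foldl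
    (fun colors kc => overwritePass nodes colors kc.1 kc.2)
    (nodes.map (fun _ => POMcol))

-- ===== PRECONDITION & SPEC =====
def Spec_make_nodecolors (nodes : List String) (POMcol : String) (microbecol : String) (DOMcol : String) (MAOMcol : String) (littercol : String) (CWDcol : String) (out : List String) : Prop := out = make_nodecolors_alt nodes POMcol microbecol DOMcol MAOMcol littercol CWDcol
instance (nodes : List String) (POMcol : String) (microbecol : String) (DOMcol : String) (MAOMcol : String) (littercol : String) (CWDcol : String) (out : List String) : Decidable (Spec_make_nodecolors nodes POMcol microbecol DOMcol MAOMcol littercol CWDcol out) := by unfold Spec_make_nodecolors; infer_instance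

-- ===== CLAIM (what is proved, stated in full; the proofs are below) =====
def Claim_equal_make_nodecolors : Prop := ∀ (nodes : List String) (POMcol : String) (microbecol : String) (DOMcol : String) (MAOMcol : String) (littercol : String) (CWDcol : String), Dom_make_nodecolors nodes POMcol microbecol DOMcol MAOMcol littercol CWDcol → Spec_make_nodecolors nodes POMcol microbecol DOMcol MAOMcol littercol CWDcol (make_nodecolors nodes POMcol microbecol DOMcol MAOMcol littercol CWDcol)

-- ===== LEMMAS AND PROOFS =====
-- one pass applied to a mapped color list is again a mapped color list
lemma overwritePass_map (nodes : List String) (f : String → String) (kw col : String) :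
    overwritePass nodes (nodes.map f) kw col
      = nodes.map (fun node => if PySem.Str.isIn kw node then col else f node) := by
  induction nodes with
  | nil => rfl
  | cons n ns ih => simp [overwritePass, List.zip] at ih ⊢; exact ih

-- the staged passes compute, per node, the fold of the rules over that node
lemma passes_eq_map (rules : List (String × String)) :
    ∀ (nodes : List String) (f : String → String),
      rules.foldl (fun colors kc => overwritePass nodes colors kc.1 kc.2) (nodes.map f)
        = nodes.map (fun node =>
            rules.foldl (fun c kc => if PySem.Str.isIn kc.1 node then kc.2 else c) (f node)) := by
  induction rules with
  | nil => intro nodes f; rfl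
  | cons kc rest ih =>
    intro nodes f
    simp only [List.foldl_cons, overwritePass_map]
    exact ih nodes _

-- A's append-accumulator loop produces, per node, its if-elif chain value
lemma make_nodecolors_foldl_eq (POMcol microbecol DOMcol MAOMcol littercol CWDcol : String) :
    ∀ (xs acc : List String),
      xs.foldl (fun colors node =>
        if PySem.Str.isIn "MICROBES" node then colors ++ [microbecol]
        else if PySem.Str.isIn "MAOM" node || PySem.Str.isIn "SOIL" node then colors ++ [MAOMcol]
        else if PySem.Str.isIn "DOM" node then colors ++ [DOMcol]
        else if PySem.Str.isIn "LITR" node then colors ++ [littercol]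
        else if PySem.Str.isIn "CWD" node then colors ++ [CWDcol]
        else colors ++ [POMcol]) acc
      = acc ++ xs.map (fun node =>
          if PySem.Str.isIn "MICROBES" node then microbecol
          else if PySem.Str.isIn "MAOM" node || PySem.Str.isIn "SOIL" node then MAOMcol
          else if PySem.Str.isIn "DOM" node then DOMcol
          else if PySem.Str.isIn "LITR" node then littercol
          else if PySem.Str.isIn "CWD" node then CWDcol
          else POMcol) := by
  intro xs
  induction xs with
  | nil => intro acc; simp
  | cons n ns ih =>
    intro acc
    simp only [List.foldl_cons, List.map_cons, ih]
    split_ifs <;> simp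

-- per-node: the reverse-priority rule fold equals the if-elif chain
lemma per_node_eq (POMcol microbecol DOMcol MAOMcol littercol CWDcol node : String) :
    ([("CWD", CWDcol), ("LITR", littercol), ("DOM", DOMcol),
      ("SOIL", MAOMcol), ("MAOM", MAOMcol), ("MICROBES", microbecol)] : List (String × String)).foldl
      (fun c kc => if PySem.Str.isIn kc.1 node then kc.2 else c) POMcol
    = (if PySem.Str.isIn "MICROBES" node then microbecol
       else if PySem.Str.isIn "MAOM" node || PySem.Str.isIn "SOIL" node then MAOMcol
       else if PySem.Str.isIn "DOM" node then DOMcol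
       else if PySem.Str.isIn "LITR" node then littercol
       else if PySem.Str.isIn "CWD" node then CWDcol
       else POMcol) := by
  simp only [List.foldl_cons, List.foldl_nil]
  cases h1 : PySem.Str.isIn "MICROBES" node <;>
  cases h2 : PySem.Str.isIn "MAOM" node <;>
  cases h3 : PySem.Str.isIn "SOIL" node <;>
  cases h4 : PySem.Str.isIn "DOM" node <;>
  cases h5 : PySem.Str.isIn "LITR" node <;>
  cases h6 : PySem.Str.isIn "CWD" node <;>
  simp

-- ===== VERDICT (by name: the statement is the Claim_ definition above) =====
theorem make_nodecolors_spec : Claim_equal_make_nodecolors := by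
  intro nodes POMcol microbecol DOMcol MAOMcol littercol CWDcol _
  unfold Spec_make_nodecolors make_nodecolors make_nodecolors_alt
  rw [passes_eq_map,
    make_nodecolors_foldl_eq POMcol microbecol DOMcol MAOMcol littercol CWDcol nodes []]
  simp only [List.nil_append]
  exact List.map_congr_left (fun node _ =>
    (per_node_eq POMcol microbecol DOMcol MAOMcol littercol CWDcol node).symm)
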